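-- pv_equiv track=rewrite | github.com/guillem-koa/aquagar-results-src | utils.py | species2families
-- ===== SOURCE A (Python) =====
-- def species2families(input_dict):
--     # Define category mappings
--     category_mapping = {
--         'Vibrio': ['vharveyi', 'valgino', 'vangil', 'vproteolyticus'],
--         'Aeromonas': ['assalmonicida'],
--         'Photobacterium': ['pddamselae', 'pdpiscicida'],
--         'Staphyloccocus': ['staphylo-'],
--         'Micrococcus': ['mluteus']
--     }
--
--     # Aggregate values based on categories
--     output_dict = {category: sum(input_dict.get(item, 0) for item in items) for category, items in category_mapping.items()}
--
--     return output_dict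
-- ===== SOURCE B (Python) =====
-- def species2families(input_dict):
--     # Same hardcoded mapping as A
--     category_mapping = {
--         'Vibrio': ['vharveyi', 'valgino', 'vangil', 'vproteolyticus'],
--         'Aeromonas': ['assalmonicida'],
--         'Photobacterium': ['pddamselae', 'pdpiscicida'],
--         'Staphyloccocus': ['staphylo-'],
--         'Micrococcus': ['mluteus']
--     }
--     # Inverted index: species -> category
--     species_to_cat = {sp: cat for cat, items in category_mapping.items() for sp in items}
--     # Output pre-initialized to 0 in the original category order
--     output_dict = {cat: 0 for cat in category_mapping}
--     # Single pass over the input, scatter counts into categories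
--     for species, count in input_dict.items():
--         cat = species_to_cat.get(species)
--         if cat is not None:
--             output_dict[cat] += count
--     return output_dict
-- ===== Notes on version B (the rewrite author's own statement) =====
-- stated objective: alternative
-- what changed: Replaces A's per-category dict comprehension (for each category, sum of input_dict.get over its species list) by an inverted species-to-category index plus a zero-initialized output dict and a single scatter pass over the input items.
import Mathlib
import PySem

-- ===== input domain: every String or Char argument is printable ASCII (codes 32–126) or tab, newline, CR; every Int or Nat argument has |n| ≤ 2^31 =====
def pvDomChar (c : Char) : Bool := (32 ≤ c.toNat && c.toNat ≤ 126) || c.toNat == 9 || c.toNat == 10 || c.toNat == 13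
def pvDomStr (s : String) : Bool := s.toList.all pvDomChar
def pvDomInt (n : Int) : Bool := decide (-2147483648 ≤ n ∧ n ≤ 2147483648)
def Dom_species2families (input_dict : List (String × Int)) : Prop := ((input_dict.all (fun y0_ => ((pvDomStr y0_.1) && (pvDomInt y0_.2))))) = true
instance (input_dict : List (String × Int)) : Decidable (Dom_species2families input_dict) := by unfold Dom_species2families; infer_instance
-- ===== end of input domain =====

-- B replaces A's per-category sum of lookups by an inverted species→category index and one scatter pass over the input (alternative decomposition, same results).

-- ===== PORT A =====
-- the hardcoded category_mapping dict (insertion order preserved)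
def catMapping : List (String × List String) :=
  [("Vibrio", ["vharveyi", "valgino", "vangil", "vproteolyticus"]),
   ("Aeromonas", ["assalmonicida"]),
   ("Photobacterium", ["pddamselae", "pdpiscicida"]),
   ("Staphyloccocus", ["staphylo-"]),
   ("Micrococcus", ["mluteus"])]

-- input_dict.get(item, 0): first-match association-list lookup, default 0 (exact for a Python dict)
def pyGetZero (d : List (String × Int)) (k : String) : Int :=
  match d with
  | [] => 0
  | (k', v) :: rest => if k' == k then v else pyGetZero rest k

-- {category: sum(input_dict.get(item, 0) for item in items) for category, items in category_mapping.items()}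
-- (keys of catMapping are distinct, so dict insertion = append)
def species2families (input_dict : List (String × Int)) : List (String × Int) :=
  catMapping.foldl
    (fun out p => out ++ [(p.1, p.2.foldl (fun s item => s + pyGetZero input_dict item) 0)]) []

-- ===== PORT B =====
-- B's own copy of the hardcoded category_mapping literal
def catMappingB : List (String × List String) :=
  [("Vibrio", ["vharveyi", "valgino", "vangil", "vproteolyticus"]),
   ("Aeromonas", ["assalmonicida"]),
   ("Photobacterium", ["pddamselae", "pdpiscicida"]),
   ("Staphyloccocus", ["staphylo-"]),
   ("Micrococcus", ["mluteus"])]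

-- species_to_cat = {sp: cat for cat, items in category_mapping.items() for sp in items}
-- (all species strings are distinct, so dict insertion = append)
def speciesToCat : List (String × String) :=
  catMappingB.foldl (fun m p => p.2.foldl (fun m' sp => m' ++ [(sp, p.1)]) m) []

-- species_to_cat.get(species): first-match lookup, None when absent
def lookupCat (m : List (String × String)) (k : String) : Option String :=
  match m with
  | [] => none
  | (k', v) :: rest => if k' == k then some v else lookupCat rest k

-- output_dict[cat] += count : modify the first (only) entry with that key
def addAt (d : List (String × Int)) (c : String) (n : Int) : List (String × Int) :=
  match d with
  | [] => []
  | (k, v) :: rest => if k == c then (k, v + n) :: rest else (k, v) :: addAt rest c n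

def species2families_alt (input_dict : List (String × Int)) : List (String × Int) :=
  let init := catMappingB.foldl (fun d p => d ++ [(p.1, (0 : Int))]) []
  input_dict.foldl
    (fun out p =>
      match lookupCat speciesToCat p.1 with
      | some cat => addAt out cat p.2
      | none => out) init

-- ===== PRECONDITION & SPEC =====
-- input_dict models a Python dict, whose keys are unique by construction; association lists with
-- duplicate keys correspond to no Python input, so they are excluded (A reads only the first
-- binding of a key, B would add every binding).
def Pre_species2families (input_dict : List (String × Int)) : Prop :=
  (input_dict.map Prod.fst).Nodup
instance (input_dict : List (String × Int)) : Decidable (Pre_species2families input_dict) := by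
  unfold Pre_species2families; infer_instance

def pvWitness_species2families : (List (String × Int)) := [("vharveyi", 2), ("foo", 5), ("mluteus", -1)]

def Spec_species2families (input_dict : List (String × Int)) (out : List (String × Int)) : Prop := out = species2families_alt input_dict
instance (input_dict : List (String × Int)) (out : List (String × Int)) : Decidable (Spec_species2families input_dict out) := by unfold Spec_species2families; infer_instance

-- ===== CLAIM (what is proved, stated in full; the proofs are below) =====
def Claim_equal_species2families : Prop := ∀ (input_dict : List (String × Int)), Dom_species2families input_dict → Pre_species2families input_dict → Spec_species2families input_dict (species2families input_dict)

-- ===== LEMMAS AND PROOFS =====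

-- per-category contribution of the input, used as the common closed form
def catSum (ss : List String) (input : List (String × Int)) : Int :=
  (input.map (fun p => if p.1 ∈ ss then p.2 else 0)).sum

-- the five-entry output dict with given values, in the original category order
def dict5 (a b c d e : Int) : List (String × Int) :=
  [("Vibrio", a), ("Aeromonas", b), ("Photobacterium", c), ("Staphyloccocus", d), ("Micrococcus", e)]

theorem catSum_cons (ss : List String) (k : String) (v : Int) (rest : List (String × Int)) :
    catSum ss ((k, v) :: rest) = (if k ∈ ss then v else 0) + catSum ss rest := by
  simp [catSum]

theorem pyGetZero_not_mem (d : List (String × Int)) (k : String)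
    (h : k ∉ d.map Prod.fst) : pyGetZero d k = 0 := by
  induction d with
  | nil => rfl
  | cons p rest ih =>
    obtain ⟨k', v'⟩ := p
    simp only [List.map_cons, List.mem_cons, not_or] at h
    have hne : (k' == k) = false := by
      rw [beq_eq_false_iff_ne]
      exact fun hk => h.1 hk.symm
    simp [pyGetZero, hne, ih h.2]

theorem sum_if (ss : List String) (hss : ss.Nodup) (k : String) (v : Int)
    (g : String → Int) (hg : g k = 0) :
    (ss.map (fun x => if k = x then v else g x)).sum
      = (if k ∈ ss then v else 0) + (ss.map g).sum := by
  induction ss with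
  | nil => simp
  | cons x t ih =>
    rw [List.nodup_cons] at hss
    obtain ⟨hx, ht⟩ := hss
    by_cases hkx : k = x
    · subst hkx
      have hmap : t.map (fun x => if k = x then v else g x) = t.map g := by
        apply List.map_congr_left
        intro y hy
        have : k ≠ y := fun h => hx (h ▸ hy)
        simp [this]
      simp [hmap, hg]
    · have := ih ht
      simp only [List.map_cons, List.sum_cons, this, List.mem_cons]
      by_cases hkt : k ∈ t
      · simp [hkx, hkt]
        ring
      · simp [hkx, hkt]

theorem sum_g (input : List (String × Int)) (h : (input.map Prod.fst).Nodup)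
    (ss : List String) (hss : ss.Nodup) :
    (ss.map (pyGetZero input)).sum = catSum ss input := by
  induction input with
  | nil =>
    simp [catSum, pyGetZero]
  | cons p rest ih =>
    obtain ⟨k, v⟩ := p
    rw [List.map_cons, List.nodup_cons] at h
    have hmap : ss.map (pyGetZero ((k, v) :: rest))
        = ss.map (fun x => if k = x then v else pyGetZero rest x) := by
      apply List.map_congr_left
      intro y _
      simp [pyGetZero]
    rw [hmap, sum_if ss hss k v _ (pyGetZero_not_mem rest k h.1), ih h.2, catSum_cons]

-- one scatter step of B's loop, on the five-entry dict
theorem step_eval (a b c d e v : Int) (k : String) :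
    (fun out (p : String × Int) =>
        match lookupCat speciesToCat p.1 with
        | some cat => addAt out cat p.2
        | none => out) (dict5 a b c d e) (k, v)
    = dict5 (a + if k ∈ ["vharveyi", "valgino", "vangil", "vproteolyticus"] then v else 0)
            (b + if k ∈ ["assalmonicida"] then v else 0)
            (c + if k ∈ ["pddamselae", "pdpiscicida"] then v else 0)
            (d + if k ∈ ["staphylo-"] then v else 0)
            (e + if k ∈ ["mluteus"] then v else 0) := by
  by_cases h1 : k = "vharveyi"
  · subst h1; simp [dict5, lookupCat, speciesToCat, catMappingB, addAt]
  by_cases h2 : k = "valgino"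
  · subst h2; simp [dict5, lookupCat, speciesToCat, catMappingB, addAt]
  by_cases h3 : k = "vangil"
  · subst h3; simp [dict5, lookupCat, speciesToCat, catMappingB, addAt]
  by_cases h4 : k = "vproteolyticus"
  · subst h4; simp [dict5, lookupCat, speciesToCat, catMappingB, addAt]
  by_cases h5 : k = "assalmonicida"
  · subst h5; simp [dict5, lookupCat, speciesToCat, catMappingB, addAt]
  by_cases h6 : k = "pddamselae"
  · subst h6; simp [dict5, lookupCat, speciesToCat, catMappingB, addAt]
  by_cases h7 : k = "pdpiscicida"
  · subst h7; simp [dict5, lookupCat, speciesToCat, catMappingB, addAt]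
  by_cases h8 : k = "staphylo-"
  · subst h8; simp [dict5, lookupCat, speciesToCat, catMappingB, addAt]
  by_cases h9 : k = "mluteus"
  · subst h9; simp [dict5, lookupCat, speciesToCat, catMappingB, addAt]
  simp [dict5, lookupCat, speciesToCat, catMappingB,
        Ne.symm h1, Ne.symm h2, Ne.symm h3, Ne.symm h4, Ne.symm h5,
        Ne.symm h6, Ne.symm h7, Ne.symm h8, Ne.symm h9,
        h1, h2, h3, h4, h5, h6, h7, h8, h9]

theorem loopB (input : List (String × Int)) (a b c d e : Int) :
    input.foldl
      (fun out p =>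
        match lookupCat speciesToCat p.1 with
        | some cat => addAt out cat p.2
        | none => out)
      (dict5 a b c d e)
    = dict5 (a + catSum ["vharveyi", "valgino", "vangil", "vproteolyticus"] input)
            (b + catSum ["assalmonicida"] input)
            (c + catSum ["pddamselae", "pdpiscicida"] input)
            (d + catSum ["staphylo-"] input)
            (e + catSum ["mluteus"] input) := by
  induction input generalizing a b c d e with
  | nil => simp [catSum]
  | cons p rest ih =>
    obtain ⟨k, v⟩ := p
    rw [List.foldl_cons]
    refine Eq.trans (congrArg (fun z => List.foldl (fun out p =>
        match lookupCat speciesToCat p.1 with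
        | some cat => addAt out cat p.2
        | none => out) z rest) (step_eval a b c d e v k)) ?_
    rw [ih]
    simp only [catSum_cons, add_assoc]

-- ===== VERDICT (by name: the statement is the Claim_ definition above) =====
theorem species2families_spec : Claim_equal_species2families := by
  intro input _ hpre
  unfold Spec_species2families
  have hB : species2families_alt input
      = dict5 (0 + catSum ["vharveyi", "valgino", "vangil", "vproteolyticus"] input)
              (0 + catSum ["assalmonicida"] input)
              (0 + catSum ["pddamselae", "pdpiscicida"] input)
              (0 + catSum ["staphylo-"] input)
              (0 + catSum ["mluteus"] input) := loopB input 0 0 0 0 0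
  have hA : species2families input
      = dict5 ((["vharveyi", "valgino", "vangil", "vproteolyticus"].map (pyGetZero input)).sum)
              ((["assalmonicida"].map (pyGetZero input)).sum)
              ((["pddamselae", "pdpiscicida"].map (pyGetZero input)).sum)
              ((["staphylo-"].map (pyGetZero input)).sum)
              ((["mluteus"].map (pyGetZero input)).sum) := by
    simp [species2families, catMapping, dict5]
    ring_nf
  rw [hA, hB]
  rw [sum_g input hpre _ (by decide), sum_g input hpre _ (by decide),
      sum_g input hpre _ (by decide), sum_g input hpre _ (by decide),
      sum_g input hpre _ (by decide)]
  simp [dict5]
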